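-- pv_equiv track=rewrite | github.com/elenamaria0703/MyProjects | AI/Unsupervised learning/main.py | tokanize
-- ===== SOURCE A (Python) =====
-- def word_extraction(sentence):
--     ignore=['it','the','on','at','up','and','or','i','was']
--     words = sentence.split(" ")
--     cleaned_text = [w.lower() for w in words if w not in ignore]
--     return cleaned_text
--
-- def tokanize(sentences):
--     words={}
--     for sentence in sentences:
--         w=word_extraction(sentence)
--         for i in w:
--             if(i in words):
--                 words[i]+=1;
--             else:
--                 words[i]=1;
--     vocab=[w for w in words if words[w]>1]
--     return vocab
-- ===== SOURCE B (Python) =====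
-- def word_extraction(sentence):
--     ignore=['it','the','on','at','up','and','or','i','was']
--     words = sentence.split(" ")
--     cleaned_text = [w.lower() for w in words if w not in ignore]
--     return cleaned_text
--
-- def tokanize(sentences):
--     flat = [w for sentence in sentences for w in word_extraction(sentence)]
--     srt = sorted(flat)
--     dups = {a for a, b in zip(srt, srt[1:]) if a == b}
--     return [w for w in dict.fromkeys(flat) if w in dups]
-- ===== Notes on version B (the rewrite author's own statement) =====
-- stated objective: alternative
-- what changed: Replaces A's incremental count-dictionary with no counting at all: flatten all cleaned words, sort the flat list, detect the duplicated words by scanning the sorted list for equal adjacent pairs, and emit the first occurrences (dict.fromkeys) that lie in that duplicate set.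
import Mathlib
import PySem

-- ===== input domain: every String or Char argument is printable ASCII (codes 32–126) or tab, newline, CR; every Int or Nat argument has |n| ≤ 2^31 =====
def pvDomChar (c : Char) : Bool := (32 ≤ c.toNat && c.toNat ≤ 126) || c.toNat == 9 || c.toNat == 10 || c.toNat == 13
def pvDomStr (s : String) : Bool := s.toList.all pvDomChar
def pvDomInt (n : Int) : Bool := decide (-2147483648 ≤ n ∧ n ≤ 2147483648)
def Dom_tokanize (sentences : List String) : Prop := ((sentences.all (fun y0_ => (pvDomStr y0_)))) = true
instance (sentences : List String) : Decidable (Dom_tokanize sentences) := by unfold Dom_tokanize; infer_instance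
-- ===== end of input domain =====

-- B replaces A's incremental count dictionary by sorting the flat word list and scanning for equal adjacent pairs; same return value (alternative algorithm, no speed claim).

-- ===== PORT A =====
-- word_extraction, shared verbatim by A and B (B keeps it unchanged)
def wordExtraction (sentence : String) : List String :=
  let ignore : List String := ["it", "the", "on", "at", "up", "and", "or", "i", "was"]
  -- Python's sentence.split(" "): sep = " " is nonempty, so split? is always `some`; getD [] is exact
  let words := (PySem.Str.split? sentence " ").getD []
  (words.filter (fun w => !(ignore.contains w))).map PySem.Str.lower

def tokanize (sentences : List String) : List String :=
  let words : PySem.Dict String Int :=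
    sentences.foldl (fun words sentence =>
      (wordExtraction sentence).foldl (fun words i =>
        if words.contains i then words.insert i (words.getD i 0 + 1)
        else words.insert i 1) words) PySem.Dict.empty
  words.keys.filter (fun w => words.getD w 0 > 1)

-- ===== PORT B =====
def tokanize_alt (sentences : List String) : List String :=
  let flat := sentences.flatMap wordExtraction
  let srt := PySem.List.sorted flat (fun x => x) false
  -- {a for a, b in zip(srt, srt[1:]) if a == b}
  let dups : PySem.Set String :=
    PySem.Set.ofList ((srt.zip (PySem.List.slice srt (some 1) none)).filterMap
      (fun p => if p.1 == p.2 then some p.1 else none))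
  (PySem.List.dedup flat).filter (fun w => PySem.Set.contains dups w)

-- ===== PRECONDITION & SPEC =====
def Spec_tokanize (sentences : List String) (out : List String) : Prop := out = tokanize_alt sentences
instance (sentences : List String) (out : List String) : Decidable (Spec_tokanize sentences out) := by unfold Spec_tokanize; infer_instance

-- ===== CLAIM (what is proved, stated in full; the proofs are below) =====
def Claim_equal_tokanize : Prop := ∀ (sentences : List String), Dom_tokanize sentences → Spec_tokanize sentences (tokanize sentences)

-- ===== LEMMAS AND PROOFS =====

-- the adjacent-equal-pair scan over a list
def adjDups (l : List String) : List String :=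
  (l.zip l.tail).filterMap (fun p => if p.1 == p.2 then some p.1 else none)

theorem adjDups_subset (l : List String) (w : String) (h : w ∈ adjDups l) : w ∈ l := by
  unfold adjDups at h
  obtain ⟨p, hp, hf⟩ := List.mem_filterMap.mp h
  by_cases hpe : p.1 == p.2
  · simp [hpe] at hf
    exact hf ▸ (List.of_mem_zip hp).1
  · simp [hpe] at hf

-- in a ≤-sorted list the adjacent-equal scan finds exactly the elements occurring at least twice
theorem adjDups_mem_iff (l : List String) (hp : l.Pairwise (· ≤ ·)) (w : String) :
    w ∈ adjDups l ↔ 2 ≤ l.count w := by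
  induction l with
  | nil => simp [adjDups]
  | cons a l' ih =>
    cases l' with
    | nil =>
      simp [adjDups, List.count_cons]
      split <;> simp
    | cons b t =>
      have ha : ∀ x ∈ b :: t, a ≤ x := fun x hx => (List.pairwise_cons.mp hp).1 x hx
      have hp' : (b :: t).Pairwise (· ≤ ·) := (List.pairwise_cons.mp hp).2
      have ih' := ih hp'
      have hadj : adjDups (a :: b :: t)
          = (if a = b then [a] else []) ++ adjDups (b :: t) := by
        by_cases hab : a = b <;> simp [adjDups, hab]
      by_cases hab : a = b
      · subst hab
        by_cases hwa : w = a
        · subst hwa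
          simp [hadj]
        · have hmm : w ∈ adjDups (a :: a :: t) ↔ w ∈ adjDups (a :: t) := by
            simp [hadj, hwa]
          rw [hmm, ih']
          simp [Ne.symm hwa]
      · have hnotmem : a ∉ b :: t := by
          intro hmem
          have hab1 : a ≤ b := ha b (by simp)
          rcases List.mem_cons.mp hmem with h1 | h2
          · exact hab (h1.symm ▸ rfl)
          · have hba : b ≤ a := (List.pairwise_cons.mp hp').1 a h2
            exact hab (le_antisymm hab1 hba)
        by_cases hwa : w = a
        · subst hwa
          constructor
          · intro h
            rw [hadj, if_neg hab] at h
            simp only [List.nil_append] at h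
            exact absurd (adjDups_subset _ _ h) hnotmem
          · intro h
            exfalso
            have h0 : (b :: t).count w = 0 := List.count_eq_zero.mpr hnotmem
            rw [List.count_cons] at h
            simp [h0] at h
        · have hmm : w ∈ adjDups (a :: b :: t) ↔ w ∈ adjDups (b :: t) := by
            simp [hadj, hab]
          rw [hmm, ih']
          simp [Ne.symm hwa]

-- A's branching step is extensionally the unconditional insert-increment step.
theorem tokanize_step_eq (d : PySem.Dict String Int) (i : String) :
    (if d.contains i then d.insert i (d.getD i 0 + 1) else d.insert i 1)
      = d.insert i (d.getD i 0 + 1) := by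
  cases h : d.contains i with
  | true => rfl
  | false => rw [if_neg (by simp [h]), PySem.Dict.getD_of_not_contains d 0 h]; norm_num

-- A nested fold over per-sentence word lists is the fold over the flattened list.
theorem foldl_foldl_eq_flatMap {α β γ : Type} (g : γ → List α) (f : β → α → β) :
    ∀ (l : List γ) (init : β),
      l.foldl (fun d s => (g s).foldl f d) init = (l.flatMap g).foldl f init := by
  intro l
  induction l with
  | nil => intro init; rfl
  | cons s rest ih =>
      intro init
      simp [List.flatMap_cons, List.foldl_append, ih]

theorem tokanize_spec' (sentences : List String) :
    tokanize sentences = tokanize_alt sentences := by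
  have hstep :
      sentences.foldl (fun words sentence =>
        (wordExtraction sentence).foldl (fun words i =>
          if words.contains i then words.insert i (words.getD i 0 + 1)
          else words.insert i 1) words) PySem.Dict.empty
        = PySem.Dict.counter (sentences.flatMap wordExtraction) := by
    have h1 : (fun (words : PySem.Dict String Int) (i : String) =>
        if words.contains i then words.insert i (words.getD i 0 + 1)
        else words.insert i 1)
        = fun words i => words.insert i (words.getD i 0 + 1) := by
      funext d i; exact tokanize_step_eq d i
    rw [h1, foldl_foldl_eq_flatMap]
    exact PySem.Dict.foldl_insert_getD_add_one_eq_counter _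
  simp only [tokanize, tokanize_alt, hstep, PySem.Dict.keys_counter,
    PySem.List.dedup_eq_ofList]
  apply List.filter_congr
  intro w _
  have hperm : (PySem.List.sorted (sentences.flatMap wordExtraction) (fun x => x) false).Perm
      (sentences.flatMap wordExtraction) := PySem.List.sorted_perm _ _ _
  have hsortedpw : (PySem.List.sorted (sentences.flatMap wordExtraction) (fun x => x) false).Pairwise
      (fun a b => a ≤ b) := by
    have := PySem.List.sorted_pairwise (xs := sentences.flatMap wordExtraction)
      (key := fun x => x)
    exact this
  have hmem := adjDups_mem_iff _ hsortedpw w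
  have hcount : (PySem.List.sorted (sentences.flatMap wordExtraction) (fun x => x) false).count w
      = (sentences.flatMap wordExtraction).count w := hperm.count_eq w
  have hc : PySem.Set.contains (PySem.Set.ofList
      (((PySem.List.sorted (sentences.flatMap wordExtraction) (fun x => x) false).zip
        (PySem.List.slice (PySem.List.sorted (sentences.flatMap wordExtraction) (fun x => x) false) (some 1) none)).filterMap
        (fun p => if p.1 == p.2 then some p.1 else none))) w
      = decide (2 ≤ (sentences.flatMap wordExtraction).count w) := by
    have hm : w ∈ (PySem.Set.ofList
        (((PySem.List.sorted (sentences.flatMap wordExtraction) (fun x => x) false).zip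
          (PySem.List.slice (PySem.List.sorted (sentences.flatMap wordExtraction) (fun x => x) false) (some 1) none)).filterMap
          (fun p => if p.1 == p.2 then some p.1 else none)))
        ↔ 2 ≤ (sentences.flatMap wordExtraction).count w := by
      rw [PySem.Set.mem_ofList, PySem.List.slice_from_one]
      rw [show (((PySem.List.sorted (sentences.flatMap wordExtraction) (fun x => x) false).zip
          (PySem.List.sorted (sentences.flatMap wordExtraction) (fun x => x) false).tail).filterMap
          (fun p => if p.1 == p.2 then some p.1 else none))
          = adjDups (PySem.List.sorted (sentences.flatMap wordExtraction) (fun x => x) false) from rfl]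
      rw [hmem, hcount]
    simp only [PySem.Set.contains]
    rw [List.contains_eq_mem]
    rw [decide_eq_decide]
    exact hm
  rw [hc, PySem.Dict.getD_counter, decide_eq_decide]
  constructor
  · intro h
    have : ((sentences.flatMap wordExtraction).count w : Int) > 1 := h
    omega
  · intro h
    have : ((sentences.flatMap wordExtraction).count w : Int) ≥ 2 := by exact_mod_cast h
    omega
-- ===== VERDICT (by name: the statement is the Claim_ definition above) =====
theorem tokanize_spec : Claim_equal_tokanize := by
  intro sentences _
  exact tokanize_spec' sentences
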